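-- pv_equiv track=rewrite | github.com/gropaul/SqlPile | src/sql_analysis/execute_queries.py | mock_parameters
-- ===== SOURCE A (Python) =====
-- from typing import Tuple, List, Literal
-- from typing import List, Literal
-- from itertools import product
--
-- mock_values = {
--     'int': '42',
--     'float': '3.14',
--     'str': "'example'",
-- }
--
-- def mock_parameters(sql: str) -> List[str]:
--     count = sql.count('?')
--
--     if count == 0:
--         return [sql]
--
--     # Generate all possible combinations of mock values
--     options_per_param = [list(mock_values.values())] * count
--     combinations = product(*options_per_param)
--
--     # Interpolate each combination into the SQL string
--     queries = []
--     for combo in combinations: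
--         query = sql
--         for value in combo:
--             query = query.replace('?', value, 1)
--         queries.append(query)
--
--     return queries
-- ===== SOURCE B (Python) =====
-- mock_values = {
--     'int': '42',
--     'float': '3.14',
--     'str': "'example'",
-- }
--
-- def mock_parameters(sql: str):
--     pre, sep, suf = sql.partition('?')
--     if not sep:
--         return [sql]
--     tails = mock_parameters(suf)
--     return [pre + v + t for v in mock_values.values() for t in tails]
-- ===== Notes on version B (the rewrite author's own statement) =====
-- stated objective: simpler
-- what changed: Replaced counting placeholders and enumerating itertools.product tuples followed by repeated one-at-a-time str.replace with a direct recursion: partition at the first placeholder, recurse on the suffix, and prepend prefix+value for each mock value.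
import Mathlib
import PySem

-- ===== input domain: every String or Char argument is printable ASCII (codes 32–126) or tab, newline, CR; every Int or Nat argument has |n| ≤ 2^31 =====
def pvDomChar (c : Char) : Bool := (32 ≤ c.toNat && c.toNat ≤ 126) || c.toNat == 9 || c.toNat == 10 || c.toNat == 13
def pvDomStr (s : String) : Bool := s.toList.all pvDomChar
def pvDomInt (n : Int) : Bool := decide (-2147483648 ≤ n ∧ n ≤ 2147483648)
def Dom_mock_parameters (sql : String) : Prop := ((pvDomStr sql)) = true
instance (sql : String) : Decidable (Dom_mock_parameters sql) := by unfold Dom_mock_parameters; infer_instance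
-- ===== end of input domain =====

-- B recurses on the suffix after the first '?' instead of enumerating itertools.product; objective: simpler.

-- mock_values.values(), as lists of chars
def pvVals : List (List Char) := ["42".toList, "3.14".toList, "'example'".toList]

-- ===== PORT A =====
-- query.replace('?', v, 1): replace the first '?' (exact on all inputs)
def replFirst (cs : List Char) (v : List Char) : List Char :=
  match cs with
  | [] => []
  | c :: rest => if c = '?' then v ++ rest else c :: replFirst rest v

-- itertools.product(*([vals] * n)): all n-tuples, first coordinate slowest (exact)
def prodN : Nat → List (List (List Char))
  | 0 => [[]]
  | n + 1 => pvVals.flatMap (fun v => (prodN n).map (fun c => v :: c))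

def mock_parameters (sql : String) : List String :=
  let cs := sql.toList
  let count := cs.count '?'          -- sql.count('?'), single char: exact
  if count = 0 then [sql]
  else (prodN count).map (fun combo => String.ofList (combo.foldl replFirst cs))

-- ===== PORT B =====
-- sql.partition('?') over chars: (prefix, none) if no '?', else (prefix, some suffix)
def splitQ : List Char → List Char × Option (List Char)
  | [] => ([], none)
  | c :: rest =>
      if c = '?' then ([], some rest)
      else
        let (p, s) := splitQ rest
        (c :: p, s)

theorem splitQ_some_length : ∀ (cs p suf : List Char), splitQ cs = (p, some suf) → suf.length < cs.length := by
  intro cs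
  induction cs with
  | nil => intro p suf h; simp [splitQ] at h
  | cons c rest ih =>
      intro p suf h
      by_cases hc : c = '?'
      · simp [splitQ, hc] at h
        simp [h.2]
      · simp [splitQ, hc] at h
        have := ih (splitQ rest).1 suf
        have h2 : splitQ rest = ((splitQ rest).1, some suf) := by
          rcases h with ⟨h1, h2⟩
          rw [← h2]
        have := this h2
        simp; omega

def altGo (cs : List Char) : List (List Char) :=
  match h : splitQ cs with
  | (_, none) => [cs]
  | (p, some suf) => pvVals.flatMap (fun v => (altGo suf).map (fun t => p ++ v ++ t))
termination_by cs.length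
decreasing_by exact splitQ_some_length cs _ suf h

def mock_parameters_alt (sql : String) : List String :=
  (altGo sql.toList).map String.ofList

-- ===== PRECONDITION & SPEC =====
def Spec_mock_parameters (sql : String) (out : List String) : Prop := out = mock_parameters_alt sql
instance (sql : String) (out : List String) : Decidable (Spec_mock_parameters sql out) := by unfold Spec_mock_parameters; infer_instance

-- ===== CLAIM (what is proved, stated in full; the proofs are below) =====
def Claim_equal_mock_parameters : Prop := ∀ (sql : String), Dom_mock_parameters sql → Spec_mock_parameters sql (mock_parameters sql)

-- ===== LEMMAS AND PROOFS =====

theorem splitQ_none (cs : List Char) (p : List Char) (h : splitQ cs = (p, none)) :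
    p = cs ∧ cs.count '?' = 0 := by
  induction cs generalizing p with
  | nil => simp [splitQ] at h; simp [h]
  | cons c rest ih =>
      by_cases hc : c = '?'
      · simp [splitQ, hc] at h
      · simp [splitQ, hc] at h
        rcases h with ⟨h1, h2⟩
        have h3 : splitQ rest = ((splitQ rest).1, none) := by rw [← h2]
        have := ih _ h3
        constructor
        · rw [← h1, this.1]
        · simp [this.2, hc]

theorem splitQ_some (cs : List Char) (p suf : List Char) (h : splitQ cs = (p, some suf)) :
    cs = p ++ '?' :: suf ∧ p.count '?' = 0 := by
  induction cs generalizing p suf with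
  | nil => simp [splitQ] at h
  | cons c rest ih =>
      by_cases hc : c = '?'
      · simp [splitQ, hc] at h
        simp [h.1, h.2, hc]
      · simp [splitQ, hc] at h
        rcases h with ⟨h1, h2⟩
        have h3 : splitQ rest = ((splitQ rest).1, some suf) := by rw [← h2]
        have := ih _ _ h3
        constructor
        · rw [← h1]
          conv_lhs => rw [this.1]
          simp
        · rw [← h1]; simp [this.2, hc]

theorem replFirst_append (q rest v : List Char) (h : q.count '?' = 0) :
    replFirst (q ++ rest) v = q ++ replFirst rest v := by
  induction q with
  | nil => simp
  | cons c q' ih =>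
      simp [List.count_cons] at h
      have hc : c ≠ '?' := by
        intro hcq; simp [hcq] at h
      simp [replFirst, hc, ih h.1]

theorem replFirst_hit (p suf v : List Char) (h : p.count '?' = 0) :
    replFirst (p ++ '?' :: suf) v = p ++ v ++ suf := by
  rw [replFirst_append _ _ _ h]
  simp [replFirst]

theorem foldl_replFirst_prefix (combo : List (List Char)) (q rest : List Char) (h : q.count '?' = 0) :
    combo.foldl replFirst (q ++ rest) = q ++ combo.foldl replFirst rest := by
  induction combo generalizing rest with
  | nil => simp
  | cons v combo ih =>
      simp [List.foldl_cons, replFirst_append _ _ _ h, ih]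

theorem pvVals_no_q : ∀ v ∈ pvVals, v.count '?' = 0 := by decide

theorem altGo_eq : ∀ (n : Nat) (cs : List Char), cs.length ≤ n →
    altGo cs = (prodN (cs.count '?')).map (fun combo => combo.foldl replFirst cs) := by
  intro n
  induction n with
  | zero =>
      intro cs hl
      have : cs = [] := by cases cs <;> simp_all
      subst this
      simp [altGo, splitQ, prodN]
  | succ n ih =>
      intro cs hl
      rw [altGo]
      split
      · next p h =>
          have := splitQ_none cs p h
          rw [this.2]
          simp [prodN]
      · next p suf h =>
          have hps := splitQ_some cs p suf h
          have hlen := splitQ_some_length cs p suf h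
          have hsuf : altGo suf = (prodN (suf.count '?')).map (fun combo => combo.foldl replFirst suf) :=
            ih suf (by omega)
          have hcount : cs.count '?' = suf.count '?' + 1 := by
            rw [hps.1]; simp [List.count_append, hps.2]
          rw [hcount]
          simp only [prodN, List.map_flatMap, List.map_map]
          rw [hsuf]
          apply List.flatMap_congr
          intro v hv
          simp only [List.map_map]
          apply List.map_congr_left
          intro combo _
          simp only [Function.comp]
          rw [hps.1, List.foldl_cons, replFirst_hit _ _ _ hps.2]
          rw [show p ++ v ++ suf = (p ++ v) ++ suf by simp]
          rw [foldl_replFirst_prefix _ _ _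
            (by simp [List.count_append, hps.2, pvVals_no_q v hv])]

-- ===== VERDICT (by name: the statement is the Claim_ definition above) =====
theorem mock_parameters_spec : Claim_equal_mock_parameters := by
  intro sql _
  unfold Spec_mock_parameters mock_parameters mock_parameters_alt
  rw [altGo_eq sql.toList.length sql.toList le_rfl]
  simp only [List.map_map]
  by_cases h : sql.toList.count '?' = 0
  · simp only [h, prodN, if_true, List.map_cons, List.map_nil, List.foldl_nil]
    exact congrArg (fun x => [x]) String.ofList_toList.symm
  · simp [h]
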